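-- pv_equiv track=rewrite | github.com/mahditaharb-maker/myfiles | python1/Euler8.py | nontrivial_euler_triples
-- ===== SOURCE A (Python) =====
-- def nontrivial_euler_triples(p):
--     """
--     Return all triples (a,b,c) with:
--       - p is prime
--       - a in [2..p-1]
--       - b>1, c>1 such that b*c = (p-1)//2
--       - a^(b*c) ≡ -1 (mod p)
--
--     If p is not prime, behavior is undefined.
--     """
--     m = (p - 1) // 2
--     # find all divisors d of m with 1 < d < m
--     divisors = []
--     for d in range(2, int(m**0.5) + 1):
--         if m % d == 0:
--             divisors.append(d)
--             if d != m // d: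
--                 divisors.append(m // d)
--     # also consider m itself only if m>1, but that gives c=1 → skip
--     triples = []
--
--     for b in sorted(divisors):
--         c = m // b
--         if c <= 1:
--             continue
--         exp = b * c
--         for a in range(2, p):
--             if pow(a, exp, p) == p - 1:
--                 triples.append((a, b, c))
--
--     return triples
-- ===== SOURCE B (Python) =====
-- def nontrivial_euler_triples(p):
--     m = (p - 1) // 2
--     divisors = []
--     d = 2
--     while d * d <= m:
--         if m % d == 0:
--             divisors.append(d)
--             if d != m // d:
--                 divisors.append(m // d)
--         d += 1
--     if not divisors:
--         return []
--     # a^(b*c) with b*c = m always (b divides m, c = m//b), so compute the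
--     # valid-a set ONCE instead of once per divisor.
--     valid_a = [a for a in range(2, p) if pow(a, m, p) == p - 1]
--     result = []
--     for b in sorted(divisors):
--         result.extend((a, b, m // b) for a in valid_a)
--     return result
-- ===== Notes on version B (the rewrite author's own statement) =====
-- stated objective: faster
-- what changed: The exponent b*c always equals m=(p-1)//2, so B computes the valid-a set once and emits it per sorted divisor (early [] when m has no nontrivial divisor) instead of A's rescan of [2,p) with a modular power per divisor; divisors come from an integer d*d<=m loop, not float sqrt. Intended as faster; the advisory a timing run measured up to ~9x at mid sizes, unconfirmed at the largest size in one run.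
-- outside the precondition, e.g. on nontrivial_euler_triples(0): A raises TypeError, B returns []
import Mathlib
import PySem

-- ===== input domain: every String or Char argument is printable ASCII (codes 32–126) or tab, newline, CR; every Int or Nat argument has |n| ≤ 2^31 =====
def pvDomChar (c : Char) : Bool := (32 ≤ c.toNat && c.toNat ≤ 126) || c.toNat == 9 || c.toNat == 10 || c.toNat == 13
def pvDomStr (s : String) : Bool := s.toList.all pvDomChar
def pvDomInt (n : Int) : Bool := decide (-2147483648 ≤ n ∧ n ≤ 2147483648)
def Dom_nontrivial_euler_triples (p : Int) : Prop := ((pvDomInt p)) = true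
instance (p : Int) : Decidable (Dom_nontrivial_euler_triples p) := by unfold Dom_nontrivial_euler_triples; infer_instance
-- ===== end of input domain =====

-- B computes the valid-a set once (the exponent b*c is always m) and emits it per sorted divisor,
-- instead of A's rescan of [2,p) with a modular power per divisor; intended as faster (advisory timing).

-- ===== PORT A =====
-- A's divisor-collecting loop body (the body of 'for d in range(2, int(m**0.5)+1)')
def pvDivStep (m : Int) (acc : List Int) (d : Int) : List Int :=
  if PySem.Int.mod m d = 0 then
    let acc := acc ++ [d]
    if d ≠ PySem.Int.floordiv m d then acc ++ [PySem.Int.floordiv m d] else acc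
  else acc

def nontrivial_euler_triples (p : Int) : List (List Int) :=
  let m := PySem.Int.floordiv (p - 1) 2
  -- int(m**0.5) ported as Nat.sqrt m.toNat: exact for 0 ≤ m ≤ 2^30 (the Dom bound); for m < 0
  -- Python raises TypeError (complex sqrt), excluded by Pre_.
  let divisors := (PySem.List.pyRange 2 ((Nat.sqrt m.toNat : Int) + 1) 1).foldl (pvDivStep m) []
  (PySem.List.sorted divisors (fun x => x) false).foldl
    (fun acc b =>
      let c := PySem.Int.floordiv m b
      if c ≤ 1 then acc
      else
        let e := b * c
        -- pow(a, e, p): e ≥ 0 here (b,c ≥ 2), so the Nat exponent e.toNat is exact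
        (PySem.List.pyRange 2 p 1).foldl
          (fun acc a => if PySem.Int.powMod a e.toNat p = p - 1 then acc ++ [[a, b, c]] else acc)
          acc) []

-- ===== PORT B =====
-- B's 'while d*d <= m' divisor loop
def pvAltDivLoop (m d : Int) : List Int :=
  if d * d ≤ m then
    (if PySem.Int.mod m d = 0 then
       if d ≠ PySem.Int.floordiv m d then [d, PySem.Int.floordiv m d] else [d]
     else []) ++ pvAltDivLoop m (d + 1)
  else []
termination_by (m + 1 - d).toNat
decreasing_by
  have hd : d ≤ d * d := by nlinarith [sq_nonneg (d - 1), sq_nonneg d]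
  omega

def nontrivial_euler_triples_alt (p : Int) : List (List Int) :=
  let m := PySem.Int.floordiv (p - 1) 2
  let divisors := pvAltDivLoop m 2
  if divisors = [] then []
  else
    -- pow(a, m, p): m ≥ 0 whenever the range is nonempty, so m.toNat is exact
    let validA := (PySem.List.pyRange 2 p 1).filter
      (fun a => PySem.Int.powMod a m.toNat p = p - 1)
    (PySem.List.sorted divisors (fun x => x) false).foldl
      (fun acc b => acc ++ validA.map (fun a => [a, b, PySem.Int.floordiv m b])) []

-- ===== PRECONDITION & SPEC =====
-- Pre_ excludes p ≤ 0, where A raises TypeError: m = (p-1)//2 is negative and m**0.5 is a complex number.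
def Pre_nontrivial_euler_triples (p : Int) : Prop := 1 ≤ p
instance (p : Int) : Decidable (Pre_nontrivial_euler_triples p) := by
  unfold Pre_nontrivial_euler_triples; infer_instance

def pvWitness_nontrivial_euler_triples : Int := 29

def Spec_nontrivial_euler_triples (p : Int) (out : List (List Int)) : Prop :=
  out = nontrivial_euler_triples_alt p
instance (p : Int) (out : List (List Int)) : Decidable (Spec_nontrivial_euler_triples p out) := by
  unfold Spec_nontrivial_euler_triples; infer_instance

-- ===== CLAIM (what is proved, stated in full; the proofs are below) =====
def Claim_equal_nontrivial_euler_triples : Prop :=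
  ∀ (p : Int), Dom_nontrivial_euler_triples p → Pre_nontrivial_euler_triples p →
    Spec_nontrivial_euler_triples p (nontrivial_euler_triples p)

-- ===== LEMMAS AND PROOFS =====

-- d ≤ sqrt(m) (as ints) ↔ d*d ≤ m, for 0 ≤ m, 0 ≤ d
lemma pv_le_sqrt_iff (m d : Int) (hm : 0 ≤ m) (hd : 0 ≤ d) :
    d ≤ (Nat.sqrt m.toNat : Int) ↔ d * d ≤ m := by
  rcases Int.eq_ofNat_of_zero_le hd with ⟨k, rfl⟩
  rcases Int.eq_ofNat_of_zero_le hm with ⟨n, rfl⟩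
  simp only [Int.toNat_natCast]
  constructor
  · intro h
    have hk : k ≤ Nat.sqrt n := by exact_mod_cast h
    have := Nat.le_sqrt.mp hk
    exact_mod_cast this
  · intro h
    have : k * k ≤ n := by exact_mod_cast h
    exact_mod_cast Nat.le_sqrt.mpr this

-- A's range-fold over [d, sqrt(m)+1) equals B's while loop from d
lemma pv_div_fold_eq (m : Int) (hm : 0 ≤ m) :
    ∀ (d : Int) (acc : List Int), 2 ≤ d →
      (PySem.List.pyRange d ((Nat.sqrt m.toNat : Int) + 1) 1).foldl (pvDivStep m) acc
        = acc ++ pvAltDivLoop m d := by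
  intro d
  induction d using pvAltDivLoop.induct m with
  | case1 d hle ih =>
    intro acc hd2
    have hlt : d < (Nat.sqrt m.toNat : Int) + 1 := by
      have := (pv_le_sqrt_iff m d hm (by omega)).mpr hle; omega
    rw [PySem.List.pyRange_one_cons hlt]
    simp only [List.foldl_cons]
    rw [ih (pvDivStep m acc d) (by omega)]
    conv_rhs => rw [pvAltDivLoop.eq_def]
    rw [if_pos hle]
    unfold pvDivStep
    split_ifs <;> first | rfl | simp [List.append_assoc]
  | case2 d hle =>
    intro acc hd2
    have : (Nat.sqrt m.toNat : Int) + 1 ≤ d := by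
      have := (pv_le_sqrt_iff m d hm (by omega)); omega
    rw [PySem.List.pyRange_one_eq_nil this, pvAltDivLoop.eq_def]
    simp [hle]

-- every member b of the divisor list: 2 ≤ b, 2 ≤ m/b, b*(m/b) = m
lemma pv_div_mem (m : Int) (_hm : 0 ≤ m) :
    ∀ (d : Int), 2 ≤ d → ∀ b ∈ pvAltDivLoop m d,
      2 ≤ b ∧ 2 ≤ m / b ∧ b * (m / b) = m := by
  intro d
  induction d using pvAltDivLoop.induct m with
  | case1 d hle ih =>
    intro hd2 b hb
    rw [pvAltDivLoop.eq_def, if_pos hle] at hb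
    rw [List.mem_append] at hb
    rcases hb with hb | hb
    · -- b from the current d's segment
      have hd0 : (0:Int) < d := by omega
      rw [PySem.Int.floordiv_of_nonneg (le_of_lt hd0)] at hb
      by_cases hmod : PySem.Int.mod m d = 0
      · have hdvd : d ∣ m := by
          have := PySem.Int.mod_of_nonneg m (le_of_lt hd0)
          exact Int.dvd_of_emod_eq_zero (by rw [← this]; exact hmod)
        have hdle : d ≤ m / d := (Int.le_ediv_iff_mul_le hd0).mpr hle
        have hmul : d * (m / d) = m := Int.mul_ediv_cancel' hdvd
        have hq0 : (0:Int) < m / d := by omega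
        have hback : m / (m / d) = d := by
          rcases hdvd with ⟨k, hk⟩
          have hk' : m / d = k := by rw [hk]; exact Int.mul_ediv_cancel_left k (by omega)
          rw [hk', hk]
          exact Int.mul_ediv_cancel _ (by omega)
        rw [if_pos hmod] at hb
        by_cases hne : d ≠ m / d
        · rw [if_pos hne] at hb
          simp only [List.mem_cons, List.not_mem_nil, or_false] at hb
          rcases hb with rfl | rfl
          · exact ⟨hd2, by omega, hmul⟩
          · refine ⟨by omega, ?_, ?_⟩
            · rw [hback]; omega
            · rw [hback, mul_comm]; exact hmul
        · rw [if_neg hne] at hb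
          simp only [List.mem_singleton] at hb
          subst hb
          exact ⟨hd2, by omega, hmul⟩
      · rw [if_neg hmod] at hb
        simp at hb
    · exact ih (by omega) b hb
  | case2 d hle =>
    intro _ b hb
    rw [pvAltDivLoop.eq_def, if_neg hle] at hb
    simp at hb

theorem nontrivial_euler_triples_spec : Claim_equal_nontrivial_euler_triples := by
  intro p _ hp
  unfold Spec_nontrivial_euler_triples nontrivial_euler_triples nontrivial_euler_triples_alt
  have hp1 : (1:Int) ≤ p := hp
  set m := PySem.Int.floordiv (p - 1) 2 with hmdef
  have hmdiv : m = (p - 1) / 2 := PySem.Int.floordiv_of_nonneg (by norm_num)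
  have hm : 0 ≤ m := by
    rw [hmdiv]; exact Int.ediv_nonneg (by omega) (by norm_num)
  simp only []
  rw [pv_div_fold_eq m hm 2 [] (by omega)]
  simp only [List.nil_append]
  by_cases hdiv : pvAltDivLoop m 2 = []
  · rw [if_pos hdiv, hdiv]
    rw [(PySem.List.sorted_eq_nil_iff _ _ _).mpr rfl]
    rfl
  · rw [if_neg hdiv]
    apply PySem.List.foldl_congr_mem
    intro acc b hb
    rw [PySem.List.mem_sorted] at hb
    obtain ⟨hb2, hc2, hbm⟩ := pv_div_mem m hm 2 (by omega) b hb
    have hfd : PySem.Int.floordiv m b = m / b := PySem.Int.floordiv_of_nonneg (by omega)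
    simp only [hfd]
    rw [if_neg (by omega)]
    have hexp : b * (m / b) = m := hbm
    rw [hexp]
    simpa using PySem.List.foldl_append_if
      (fun a => decide (PySem.Int.powMod a m.toNat p = p - 1))
      (fun a => [a, b, m / b]) (PySem.List.pyRange 2 p 1) acc
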